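-- pv_equiv track=rewrite | github.com/ln-one/Spectra | backend/services/generation_session_service/tool_refine_builder/word_document_markdown_quality.py | _has_broken_table_like_lines
-- ===== SOURCE A (Python) =====
-- def _split_markdown_table_row(line: str) -> list[str]:
--     stripped = str(line or "").strip()
--     if stripped.startswith("|"):
--         stripped = stripped[1:]
--     if stripped.endswith("|"):
--         stripped = stripped[:-1]
--     return [cell.strip() for cell in stripped.split("|")]
--
-- def _is_markdown_table_separator(line: str) -> bool:
--     cells = _split_markdown_table_row(line)
--     if not cells:
--         return False
--     has_dash = False
--     for cell in cells:
--         normalized = cell.replace("-", "").replace(":", "").strip()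
--         if normalized:
--             return False
--         if "-" in cell:
--             has_dash = True
--     return has_dash
--
-- def _is_markdown_table_row(line: str) -> bool:
--     return str(line or "").strip().count("|") >= 2
--
-- def _has_broken_table_like_lines(markdown: str) -> bool:
--     lines = [line.rstrip() for line in str(markdown or "").splitlines()]
--     index = 0
--     while index < len(lines):
--         current = lines[index]
--         if not _is_markdown_table_row(current):
--             index += 1
--             continue
--         if index + 1 < len(lines) and _is_markdown_table_separator(lines[index + 1]):
--             index += 2
--             while index < len(lines) and _is_markdown_table_row(lines[index]):
--                 index += 1
--             continue
--         return True
--     return False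
-- ===== SOURCE B (Python) =====
-- def _split_markdown_table_row(line: str) -> list[str]:
--     stripped = str(line or "").strip()
--     if stripped.startswith("|"):
--         stripped = stripped[1:]
--     if stripped.endswith("|"):
--         stripped = stripped[:-1]
--     return [cell.strip() for cell in stripped.split("|")]
--
-- def _is_markdown_table_separator(line: str) -> bool:
--     cells = _split_markdown_table_row(line)
--     if not cells:
--         return False
--     has_dash = False
--     for cell in cells:
--         normalized = cell.replace("-", "").replace(":", "").strip()
--         if normalized:
--             return False
--         if "-" in cell:
--             has_dash = True
--     return has_dash
--
-- def _is_markdown_table_row(line: str) -> bool: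
--     return str(line or "").strip().count("|") >= 2
--
-- def _has_broken_table_like_lines(markdown: str) -> bool:
--     # Single forward pass over (line, lookahead) pairs driven by a 3-state
--     # Mealy machine (0 = scanning, 1 = just validated a separator, 2 = table body),
--     # instead of an index-walking while-loop with a nested row-skipping loop.
--     lines = [line.rstrip() for line in str(markdown or "").splitlines()]
--     nexts = lines[1:] + [None]
--     mode = 0
--     for cur, nxt in zip(lines, nexts):
--         if mode == 1:
--             mode = 2
--         elif mode == 2 and _is_markdown_table_row(cur):
--             pass
--         elif _is_markdown_table_row(cur):
--             if nxt is not None and _is_markdown_table_separator(nxt):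
--                 mode = 1
--             else:
--                 return True
--         else:
--             mode = 0
--     return False
-- ===== Notes on version B (the rewrite author's own statement) =====
-- stated objective: alternative
-- what changed: Replaced A's index-walking while-loop with a nested row-skipping inner loop by a single forward fold over (line, lookahead) pairs driven by an explicit 3-state machine (scanning / separator-seen / table-body); helper predicates unchanged.
import Mathlib
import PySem

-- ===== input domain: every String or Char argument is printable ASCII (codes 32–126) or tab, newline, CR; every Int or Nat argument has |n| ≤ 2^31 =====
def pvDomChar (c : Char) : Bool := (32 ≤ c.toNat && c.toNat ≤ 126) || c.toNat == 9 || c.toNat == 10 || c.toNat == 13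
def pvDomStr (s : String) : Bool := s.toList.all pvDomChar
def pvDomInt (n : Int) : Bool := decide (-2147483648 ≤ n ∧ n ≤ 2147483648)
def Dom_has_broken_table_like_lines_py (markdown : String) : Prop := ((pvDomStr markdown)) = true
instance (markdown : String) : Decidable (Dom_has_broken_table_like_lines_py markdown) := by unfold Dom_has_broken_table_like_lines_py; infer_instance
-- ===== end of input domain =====

-- B replaces A's index-walking while-loop (with its nested row-skipping inner loop)
-- by a single forward pass over (line, lookahead) pairs driven by a 3-state machine;
-- objective: alternative decomposition, same cost.


-- ===== PORT A =====
-- shared helpers (identical in A and B's Python sources)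
-- _split_markdown_table_row; 'str(line or "")' is the identity on a str argument
def splitMarkdownTableRow (line : String) : List String :=
  let stripped := PySem.Str.strip line
  let stripped := if PySem.Str.startswith stripped "|" then PySem.Str.slice stripped (some 1) none else stripped
  let stripped := if PySem.Str.endswith stripped "|" then PySem.Str.slice stripped none (some (-1)) else stripped
  -- split? never returns none for the nonempty separator "|"
  ((PySem.Str.split? stripped "|").getD []).map PySem.Str.strip

-- the for-loop of _is_markdown_table_separator (early 'return False' = result false)
def sepLoop : List String → Bool → Bool
  | [], hasDash => hasDash
  | cell :: rest, hasDash =>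
    let normalized := PySem.Str.strip (PySem.Str.replace (PySem.Str.replace cell "-" "") ":" "")
    if normalized ≠ "" then false
    else sepLoop rest (hasDash || PySem.Str.isIn "-" cell)

def isMarkdownTableSeparator (line : String) : Bool :=
  let cells := splitMarkdownTableRow line
  if cells = [] then false else sepLoop cells false

def isMarkdownTableRow (line : String) : Bool :=
  decide (2 ≤ PySem.Str.count (PySem.Str.strip line) "|")

-- A's inner 'while index < len(lines) and _is_markdown_table_row(lines[index])'
def aSkipRows : List String → List String
  | [] => []
  | l :: ls => if isMarkdownTableRow l then aSkipRows ls else l :: ls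

theorem aSkipRows_length_le (ls : List String) : (aSkipRows ls).length ≤ ls.length := by
  induction ls with
  | nil => simp [aSkipRows]
  | cons a ls ih =>
    rw [aSkipRows]
    split
    · simp; omega
    · simp

-- A's outer while-loop, as structural recursion on the suffix of lines at 'index'
def aLoop : List String → Bool
  | [] => false
  | current :: rest =>
    if ¬ isMarkdownTableRow current then aLoop rest
    else
      match rest with
      | [] => true
      | next :: rest2 =>
        if isMarkdownTableSeparator next then aLoop (aSkipRows rest2) else true
  termination_by ls => ls.length
  decreasing_by
  all_goals simp
  all_goals first
    | omega
    | (have := aSkipRows_length_le rest2; omega)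

def has_broken_table_like_lines_py (markdown : String) : Bool :=
  aLoop ((PySem.Str.splitlines markdown).map PySem.Str.rstrip)

-- ===== PORT B =====
-- Source B's for-loop over zip(lines, nexts) with the mode state; early 'return True' = true
def bLoop : List (String × Option String) → Nat → Bool
  | [], _ => false
  | (cur, nxt) :: rest, mode =>
    if mode == 1 then bLoop rest 2
    else if mode == 2 && isMarkdownTableRow cur then bLoop rest 2
    else if isMarkdownTableRow cur then
      (match nxt with
       | some n => if isMarkdownTableSeparator n then bLoop rest 1 else true
       | none => true)
    else bLoop rest 0

def has_broken_table_like_lines_py_alt (markdown : String) : Bool :=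
  let lines := (PySem.Str.splitlines markdown).map PySem.Str.rstrip
  let nexts := (PySem.List.slice lines (some 1) none).map some ++ [none]
  bLoop (List.zip lines nexts) 0

-- ===== PRECONDITION & SPEC =====
def Spec_has_broken_table_like_lines_py (markdown : String) (out : Bool) : Prop := out = has_broken_table_like_lines_py_alt markdown
instance (markdown : String) (out : Bool) : Decidable (Spec_has_broken_table_like_lines_py markdown out) := by unfold Spec_has_broken_table_like_lines_py; infer_instance

-- ===== CLAIM (what is proved, stated in full; the proofs are below) =====
def Claim_equal_has_broken_table_like_lines_py : Prop := ∀ (markdown : String), Dom_has_broken_table_like_lines_py markdown → Spec_has_broken_table_like_lines_py markdown (has_broken_table_like_lines_py markdown)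

-- ===== LEMMAS AND PROOFS =====
-- the zipped pair list B folds over, as a function of the line list
def zn (l : List String) : List (String × Option String) :=
  List.zip l ((PySem.List.slice l (some 1) none).map some ++ [none])

theorem zn_cons (a : String) (l : List String) :
    zn (a :: l) = (a, l.head?) :: zn l := by
  unfold zn
  simp [PySem.List.slice_from_one]
  cases l <;> simp

-- B in mode 2 consumes exactly the rows A's inner while-loop skips
theorem bLoop_mode2 (xs : List String) :
    bLoop (zn xs) 2 = bLoop (zn (aSkipRows xs)) 0 := by
  induction xs with
  | nil => simp [aSkipRows, zn, bLoop]
  | cons x xs ih =>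
    rw [zn_cons]
    by_cases hx : isMarkdownTableRow x
    · simp [aSkipRows, hx, bLoop, ih]
    · simp [aSkipRows, hx, bLoop, zn_cons]

theorem aLoop_eq_bLoop (l : List String) : aLoop l = bLoop (zn l) 0 := by
  induction hn : l.length using Nat.strong_induction_on generalizing l with
  | _ n ih =>
    match l with
    | [] => simp [aLoop, zn, bLoop]
    | current :: rest =>
      rw [zn_cons]
      by_cases hc : isMarkdownTableRow current
      · match rest with
        | [] => simp [aLoop, hc, bLoop]
        | next :: rest2 =>
          by_cases hs : isMarkdownTableSeparator next
          · rw [aLoop.eq_def]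
            simp only [hc, hs, not_true_eq_false, if_false, if_true]
            simp only [bLoop, List.head?_cons, hc, hs, if_true, zn_cons]
            simp only [Nat.reduceBEq, if_true]
            rw [bLoop_mode2]
            have hlen : (aSkipRows rest2).length < n := by
              have := aSkipRows_length_le rest2; simp at hn; omega
            exact ih _ hlen _ rfl
          · simp [aLoop, hc, hs, bLoop]
      · rw [aLoop.eq_def]
        simp only [hc]
        simp only [bLoop, hc, Bool.and_false, Nat.reduceBEq]
        have hlen : rest.length < n := by simp at hn; omega
        exact ih _ hlen _ rfl

-- ===== VERDICT (by name: the statement is the Claim_ definition above) =====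
theorem has_broken_table_like_lines_py_spec : Claim_equal_has_broken_table_like_lines_py := by
  intro markdown _
  unfold Spec_has_broken_table_like_lines_py has_broken_table_like_lines_py has_broken_table_like_lines_py_alt
  exact aLoop_eq_bLoop _
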